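-- pv_equiv track=rewrite | github.com/Murazakl/main | I33/tp6bis.py | combinaison_lineaire
-- ===== SOURCE A (Python) =====
-- def combinaison_lineaire(c,V,p):
--     L = []
--     for i in range(len(V[0])):
--         s = 0
--         for j in range(len(c)):
--             s += c[j] * V[j][i]
--         L += [s%p]
--     return L
-- ===== SOURCE B (Python) =====
-- def combinaison_lineaire(c, V, p):
--     acc = [0] * len(V[0])
--     for cj, vj in zip(c, V):
--         acc = [a + cj * x for a, x in zip(acc, vj)]
--     return [a % p for a in acc]
-- ===== Notes on version B (the rewrite author's own statement) =====
-- stated objective: alternative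
-- what changed: Inverted the loop nesting: instead of computing each output component with an inner scan over all vectors, B folds over the (coefficient, vector) pairs maintaining a vector of partial sums (zipWith accumulation), with a single final mod pass.
import Mathlib
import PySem

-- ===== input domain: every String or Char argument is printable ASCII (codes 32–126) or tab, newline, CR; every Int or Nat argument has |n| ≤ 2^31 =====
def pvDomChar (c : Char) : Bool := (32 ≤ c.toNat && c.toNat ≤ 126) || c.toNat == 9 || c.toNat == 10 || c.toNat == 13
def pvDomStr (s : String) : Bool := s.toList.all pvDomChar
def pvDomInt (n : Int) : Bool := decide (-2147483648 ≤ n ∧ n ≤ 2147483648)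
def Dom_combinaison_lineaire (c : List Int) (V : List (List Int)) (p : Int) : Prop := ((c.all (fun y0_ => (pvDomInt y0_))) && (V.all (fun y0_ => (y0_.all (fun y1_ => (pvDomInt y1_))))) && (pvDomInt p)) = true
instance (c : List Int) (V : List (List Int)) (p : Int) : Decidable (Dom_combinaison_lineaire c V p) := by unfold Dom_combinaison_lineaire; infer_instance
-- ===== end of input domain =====

-- B inverts the loop nesting: it folds over the (coefficient, vector) pairs maintaining a
-- vector of partial sums, then takes mod p in one final pass (objective: alternative).

-- ===== PORT A =====
def combinaison_lineaire (c : List Int) (V : List (List Int)) (p : Int) : List Int :=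
  (PySem.List.pyRange 0 ((PySem.List.pyGetD V 0 []).length : Int) 1).foldl
    (fun L i =>
      L ++ [PySem.Int.mod
        ((PySem.List.pyRange 0 (c.length : Int) 1).foldl
          (fun s j => s + PySem.List.pyGetD c j 0 * PySem.List.pyGetD (PySem.List.pyGetD V j []) i 0) 0) p]) []

-- ===== PORT B =====
def combinaison_lineaire_alt (c : List Int) (V : List (List Int)) (p : Int) : List Int :=
  ((c.zip V).foldl
      (fun a cv => (a.zip cv.2).map (fun q => q.1 + cv.1 * q.2))
      (List.replicate (PySem.List.pyGetD V 0 []).length 0)).map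
    (fun a => PySem.Int.mod a p)

-- ===== PRECONDITION & SPEC =====
-- Pre_ excludes exactly the inputs where Python A raises: V empty (IndexError on V[0]),
-- and — when V[0] is nonempty, so the loops actually run — p = 0 (ZeroDivisionError) or
-- some j < len(c) with V[j] missing or shorter than V[0] (IndexError).
def Pre_combinaison_lineaire (c : List Int) (V : List (List Int)) (p : Int) : Prop :=
  V ≠ [] ∧ ((V.headD []).length = 0 ∨
    (p ≠ 0 ∧ ∀ j < c.length, j < V.length ∧ (V.headD []).length ≤ (V.getD j []).length))
instance (c : List Int) (V : List (List Int)) (p : Int) : Decidable (Pre_combinaison_lineaire c V p) := by unfold Pre_combinaison_lineaire; infer_instance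

def pvWitness_combinaison_lineaire : List Int × List (List Int) × Int :=
  ([2, -3], [[1, 0, 4], [5, 6, -7]], 5)

def Spec_combinaison_lineaire (c : List Int) (V : List (List Int)) (p : Int) (out : List Int) : Prop := out = combinaison_lineaire_alt c V p
instance (c : List Int) (V : List (List Int)) (p : Int) (out : List Int) : Decidable (Spec_combinaison_lineaire c V p out) := by unfold Spec_combinaison_lineaire; infer_instance

-- ===== CLAIM (what is proved, stated in full; the proofs are below) =====
def Claim_equal_combinaison_lineaire : Prop := ∀ (c : List Int) (V : List (List Int)) (p : Int), Dom_combinaison_lineaire c V p → Pre_combinaison_lineaire c V p → Spec_combinaison_lineaire c V p (combinaison_lineaire c V p)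

-- ===== LEMMAS AND PROOFS =====

-- A's inner index loop, written as a sum over the zipped lists (every index must be in range for V).
lemma rangeSum_eq_zipSum (i : Nat) :
    ∀ (c : List Int) (V : List (List Int)), (∀ j, j < c.length → j < V.length) →
    ((List.range c.length).map (fun j => c.getD j 0 * (V.getD j []).getD i 0)).sum
      = ((c.zip V).map (fun q => q.1 * q.2.getD i 0)).sum := by
  intro c
  induction c with
  | nil => intro V _; simp
  | cons c0 c ih =>
    intro V h
    cases V with
    | nil => exact absurd (h 0 (by simp)) (by simp)
    | cons v0 V =>
      have h' : ∀ j, j < c.length → j < V.length := by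
        intro j hj
        have := h (j + 1) (by simp only [List.length_cons]; omega)
        simp only [List.length_cons] at this
        omega
      simp only [List.length_cons, List.range_succ_eq_map, List.map_cons, List.map_map,
        List.sum_cons, List.zip_cons_cons, Function.comp_def, Nat.succ_eq_add_one,
        List.getD_cons_succ, List.getD_cons_zero]
      rw [ih V h']

-- B's accumulator fold: each slot i holds its start value plus the column-i dot product.
lemma foldB_spec :
    ∀ (cs : List (Int × List Int)) (acc : List Int),
      (∀ q ∈ cs, acc.length ≤ q.2.length) →
      cs.foldl (fun a cv => (a.zip cv.2).map (fun q => q.1 + cv.1 * q.2)) acc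
        = (List.range acc.length).map
            (fun i => acc.getD i 0 + ((cs.map (fun q => q.1 * q.2.getD i 0)).sum)) := by
  intro cs
  induction cs with
  | nil =>
    intro acc _
    simp only [List.foldl_nil, List.map_nil, List.sum_nil, Int.add_zero]
    apply List.ext_getElem (by simp)
    intro k hk1 hk2
    simp only [List.getElem_map, List.getElem_range]
    rw [List.getD_eq_getElem acc 0 (by simpa using hk2)]
  | cons q0 cs ih =>
    intro acc h
    have hlen : acc.length ≤ q0.2.length := h q0 (by simp)
    have hstep : ((acc.zip q0.2).map (fun q => q.1 + q0.1 * q.2)).length = acc.length := by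
      simp; omega
    simp only [List.foldl_cons]
    rw [ih _ (by intro q hq; rw [hstep]; exact h q (List.mem_cons_of_mem _ hq))]
    rw [hstep]
    apply List.map_congr_left
    intro i hi
    have hi' : i < acc.length := List.mem_range.mp hi
    simp only [List.map_cons, List.sum_cons]
    rw [List.getD_eq_getElem _ 0 (by simpa [hstep] using hi'),
        List.getD_eq_getElem acc 0 hi',
        List.getD_eq_getElem q0.2 0 (by omega)]
    simp [List.getElem_zip]
    ring

theorem combinaison_lineaire_spec : Claim_equal_combinaison_lineaire := by
  intro c V p _ hpre
  unfold Spec_combinaison_lineaire combinaison_lineaire combinaison_lineaire_alt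
  obtain ⟨hV, hpre⟩ := hpre
  obtain ⟨v0, V', rfl⟩ : ∃ v0 V', V = v0 :: V' := by
    cases V with
    | nil => exact absurd rfl hV
    | cons a b => exact ⟨a, b, rfl⟩
  simp only [PySem.List.pyGetD_zero_cons, List.headD_cons] at *
  rcases hpre with hz | ⟨_, hj⟩
  · -- zero-width vectors: both ports return []
    rw [foldB_spec _ _ (by intro q _; simp [hz])]
    simp [hz, PySem.List.pyRange_zero]
  · -- main case: compare column by column
    have hjj : ∀ j, j < c.length → j < (v0 :: V').length := fun j hjc => (hj j hjc).1
    rw [PySem.List.foldl_append_singleton_eq_map]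
    rw [foldB_spec _ _ (by
      intro q hq
      obtain ⟨k, hk, hget⟩ := List.mem_iff_getElem.mp hq
      have hk1 : k < c.length := by
        simp only [List.length_zip] at hk; omega
      have h2 := (hj k hk1).2
      rw [List.getD_eq_getElem (v0 :: V') [] (hjj k hk1)] at h2
      rw [← hget]
      simpa [List.getElem_zip] using h2)]
    simp only [List.nil_append, List.length_replicate, PySem.List.pyRange_zero_nat,
      List.map_map]
    apply List.map_congr_left
    intro k hk
    have hk' : k < v0.length := List.mem_range.mp hk
    simp only [Function.comp_def]
    congr 1
    rw [List.getD_replicate 0 hk', PySem.List.foldl_add, List.map_map]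
    simp only [Function.comp_def, PySem.List.pyGetD_natCast, zero_add]
    exact rangeSum_eq_zipSum k c (v0 :: V') hjj
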